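-- pv_equiv track=rewrite | github.com/massimodeagro/SPiDbox | OS/drop.py | postrack
-- ===== SOURCE A (Python) =====
-- def postrack(steps, position): #this formula does the same exact steps without moving the motor. It is used to count the steps
--     for i in range(steps):
--         position+=1
--         if position==19 or position==52 or position==119 or position==152:
--             for i in range(14):
--                 position+=1
--         if position==85 or position==185:
--             for i in range(15):
--                 position+=1
--         if position==200:
--             position=0
--     return position
-- ===== SOURCE B (Python) =====
-- def next_event(position):
--     # least "event" value strictly above position, with the position reached after the event fires
--     if position < 19: return (19, 33)
--     if position < 52: return (52, 66)
--     if position < 85: return (85, 100)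
--     if position < 119: return (119, 133)
--     if position < 152: return (152, 166)
--     if position < 185: return (185, 0)
--     return (200, 0)
--
-- def postrack(steps, position):
--     if steps <= 0:
--         return position
--     if position >= 200:
--         return position + steps  # no event value is ever reached
--     v, tgt = next_event(position)
--     d = v - position
--     if steps < d:
--         return position + steps
--     # after the first event the position is on the 114-step cycle: jump ahead modularly
--     steps = (steps - d) % 114
--     position = tgt
--     while steps > 0:
--         v, tgt = next_event(position)
--         d = v - position
--         if steps < d:
--             return position + steps
--         steps -= d
--         position = tgt
--     return position
-- ===== Notes on version B (the rewrite author's own statement) =====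
-- stated objective: faster
-- what changed: Replaces the step-by-step simulation of all `steps` increments by event arithmetic: jump directly to the next special position, then reduce the remaining steps modulo the 114-state cycle, so at most 8 arithmetic hops are done regardless of steps.
import Mathlib
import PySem

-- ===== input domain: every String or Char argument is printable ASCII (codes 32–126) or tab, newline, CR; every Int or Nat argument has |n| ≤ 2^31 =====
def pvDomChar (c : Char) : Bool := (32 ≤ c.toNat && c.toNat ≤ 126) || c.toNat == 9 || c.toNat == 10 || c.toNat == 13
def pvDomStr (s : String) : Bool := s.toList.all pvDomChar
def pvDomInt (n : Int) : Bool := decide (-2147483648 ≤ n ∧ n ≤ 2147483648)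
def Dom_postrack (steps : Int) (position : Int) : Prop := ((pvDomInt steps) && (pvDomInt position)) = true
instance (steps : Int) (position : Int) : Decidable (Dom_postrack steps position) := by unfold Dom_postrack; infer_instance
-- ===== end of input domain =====

-- B replaces A's step-by-step simulation by event arithmetic on the 114-state cycle (measured faster, asymptotic).

-- ===== PORT A =====
-- body of A's outer for-loop; the two inner 'for i in range(..)' loops are the two folds
def fstepA (position : Int) : Int :=
  let p1 := position + 1
  let p2 := if p1 = 19 ∨ p1 = 52 ∨ p1 = 119 ∨ p1 = 152 then
      (PySem.List.pyRange 0 14 1).foldl (fun q _ => q + 1) p1 else p1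
  let p3 := if p2 = 85 ∨ p2 = 185 then
      (PySem.List.pyRange 0 15 1).foldl (fun q _ => q + 1) p2 else p2
  if p3 = 200 then 0 else p3

def postrack (steps : Int) (position : Int) : Int :=
  (PySem.List.pyRange 0 steps 1).foldl (fun p _ => fstepA p) position

-- ===== PORT B =====
def nextEvent (position : Int) : Int × Int :=
  if position < 19 then (19, 33)
  else if position < 52 then (52, 66)
  else if position < 85 then (85, 100)
  else if position < 119 then (119, 133)
  else if position < 152 then (152, 166)
  else if position < 185 then (185, 0)
  else (200, 0)

-- B's 'while steps > 0' loop; fuel is only a totality guard (7 always suffices here: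
-- steps < 114 on entry and every hop subtracts 19)
def loopB : Nat → Int → Int → Int
  | 0, _, position => position
  | fuel + 1, steps, position =>
    if steps > 0 then
      let vt := nextEvent position
      let d := vt.1 - position
      if steps < d then position + steps
      else loopB fuel (steps - d) vt.2
    else position

def postrack_alt (steps : Int) (position : Int) : Int :=
  if steps ≤ 0 then position
  else if position ≥ 200 then position + steps
  else
    let vt := nextEvent position
    let d := vt.1 - position
    if steps < d then position + steps
    else loopB 7 (PySem.Int.mod (steps - d) 114) vt.2

-- ===== PRECONDITION & SPEC =====
def Spec_postrack (steps : Int) (position : Int) (out : Int) : Prop := out = postrack_alt steps position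
instance (steps : Int) (position : Int) (out : Int) : Decidable (Spec_postrack steps position out) := by unfold Spec_postrack; infer_instance

-- ===== CLAIM (what is proved, stated in full; the proofs are below) =====
def Claim_equal_postrack : Prop := ∀ (steps : Int) (position : Int), Dom_postrack steps position → Spec_postrack steps position (postrack steps position)

-- ===== LEMMAS AND PROOFS =====

-- the positions B's loop can be at after an event has fired (the 6 post-jump states)
def isTgt (t : Int) : Prop := t = 0 ∨ t = 33 ∨ t = 66 ∨ t = 100 ∨ t = 133 ∨ t = 166

theorem foldl_fstepA_eq_iterate (l : List Int) (p : Int) :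
    l.foldl (fun q _ => fstepA q) p = fstepA^[l.length] p := by
  induction l generalizing p with
  | nil => rfl
  | cons a t ih => simp [List.foldl, ih, Function.iterate_succ_apply]

theorem postrack_eq_iterate (s p : Int) : postrack s p = fstepA^[s.toNat] p := by
  unfold postrack
  rw [foldl_fstepA_eq_iterate, PySem.List.length_pyRange_one]
  norm_num

theorem fstepA_high (p : Int) (h : 200 ≤ p) : fstepA p = p + 1 := by
  unfold fstepA
  rw [if_neg (by omega), if_neg (by omega), if_neg (by omega)]

theorem iterate_high (n : Nat) (p : Int) (h : 200 ≤ p) : fstepA^[n] p = p + n := by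
  induction n generalizing p with
  | zero => simp
  | succ k ih =>
    rw [Function.iterate_succ_apply, fstepA_high p h, ih (p + 1) (by omega)]
    push_cast; ring

theorem nextEvent_gt (p : Int) : p < (nextEvent p).1 ∨ 200 ≤ p := by
  unfold nextEvent; split_ifs <;> omega

theorem fstepA_plain (p : Int) (h2 : p + 1 < (nextEvent p).1) : fstepA p = p + 1 := by
  unfold nextEvent at h2
  unfold fstepA
  split_ifs at h2 <;> rw [if_neg (by omega), if_neg (by omega), if_neg (by omega)]

theorem nextEvent_succ (p : Int) (h2 : p + 1 < (nextEvent p).1) : nextEvent (p + 1) = nextEvent p := by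
  unfold nextEvent at h2 ⊢
  split_ifs at h2 <;> (split_ifs <;> first | rfl | omega)

theorem iterate_plain (d : Nat) (p : Int) (h : (d : Int) < (nextEvent p).1 - p) :
    fstepA^[d] p = p + d := by
  induction d generalizing p with
  | zero => simp
  | succ k ih =>
    have hp1 : p + 1 < (nextEvent p).1 := by push_cast at h; omega
    rw [Function.iterate_succ_apply, fstepA_plain p hp1,
      ih (p + 1) (by rw [nextEvent_succ p hp1]; push_cast at h ⊢; omega)]
    push_cast; ring

theorem fstepA_at_event (p : Int) : fstepA ((nextEvent p).1 - 1) = (nextEvent p).2 := by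
  unfold nextEvent; split_ifs <;> decide

theorem iterate_event (p : Int) (h : p < 200) :
    fstepA^[((nextEvent p).1 - p).toNat] p = (nextEvent p).2 := by
  have hvp : p < (nextEvent p).1 := by rcases nextEvent_gt p with h' | h'; exact h'; omega
  obtain ⟨k, hk⟩ : ∃ k, ((nextEvent p).1 - p).toNat = k + 1 :=
    ⟨((nextEvent p).1 - p).toNat - 1, by omega⟩
  rw [hk, Function.iterate_succ_apply', iterate_plain k p (by omega),
    show p + (k : Int) = (nextEvent p).1 - 1 by omega, fstepA_at_event]

theorem nextEvent_tgt (p : Int) : isTgt (nextEvent p).2 := by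
  unfold nextEvent isTgt; split_ifs <;> simp

set_option maxRecDepth 40000 in
theorem iterate19 (t : Int) (ht : isTgt t) :
    fstepA^[19] t = (nextEvent t).2 ∧ (nextEvent t).1 - t = 19 := by
  rcases ht with h | h | h | h | h | h <;> subst h <;> exact ⟨by decide, by decide⟩

set_option maxRecDepth 40000 in
theorem iterate114 (t : Int) (ht : isTgt t) : fstepA^[114] t = t := by
  rcases ht with h | h | h | h | h | h <;> subst h <;> decide

theorem iterate_mod (t : Int) (ht : isTgt t) (n : Nat) :
    fstepA^[n] t = fstepA^[n % 114] t := by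
  induction n using Nat.strong_induction_on with
  | _ n ih =>
    by_cases h : n < 114
    · rw [Nat.mod_eq_of_lt h]
    · rw [show n = (n - 114) + 114 by omega, Function.iterate_add_apply, iterate114 t ht,
        ih (n - 114) (by omega)]
      congr 1; omega

theorem loopB_eq (fuel : Nat) : ∀ (n : Nat) (t : Int), isTgt t → n ≤ 19 * fuel →
    loopB fuel (n : Int) t = fstepA^[n] t := by
  induction fuel with
  | zero =>
    intro n t ht hn
    have h0 : n = 0 := by omega
    subst h0; rfl
  | succ f ih =>
    intro n t ht hn
    by_cases h0 : n = 0
    · subst h0; simp [loopB]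
    obtain ⟨h19a, h19b⟩ := iterate19 t ht
    show (if (n : Int) > 0 then _ else _) = _
    rw [if_pos (by omega : (n : Int) > 0)]
    by_cases hlt : (n : Int) < (nextEvent t).1 - t
    · simp only [if_pos hlt]
      exact (iterate_plain n t (by omega)).symm
    · simp only [if_neg hlt]
      rw [h19b] at hlt ⊢
      have hn19 : 19 ≤ n := by omega
      rw [show (n : Int) - 19 = ((n - 19 : Nat) : Int) by omega,
        ih (n - 19) _ (nextEvent_tgt t) (by omega), ← h19a, ← Function.iterate_add_apply,
        show (n - 19) + 19 = n by omega]

-- ===== VERDICT (by name: the statement is the Claim_ definition above) =====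
theorem postrack_spec : Claim_equal_postrack := by
  intro s p _
  unfold Spec_postrack
  rw [postrack_eq_iterate]
  unfold postrack_alt
  by_cases hs : s ≤ 0
  · rw [if_pos hs, show s.toNat = 0 by omega]; rfl
  · rw [if_neg hs]
    by_cases hp : p ≥ 200
    · rw [if_pos hp, iterate_high s.toNat p hp, Int.toNat_of_nonneg (by omega)]
    · rw [if_neg hp]
      have hvp : p < (nextEvent p).1 := by
        rcases nextEvent_gt p with h' | h'; exact h'; omega
      show fstepA^[s.toNat] p = if s < (nextEvent p).1 - p then p + s
        else loopB 7 (PySem.Int.mod (s - ((nextEvent p).1 - p)) 114) (nextEvent p).2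
      by_cases hlt : s < (nextEvent p).1 - p
      · rw [if_pos hlt, iterate_plain s.toNat p (by omega), Int.toNat_of_nonneg (by omega)]
      · rw [if_neg hlt]
        set d := (nextEvent p).1 - p with hd
        set n := (s - d).toNat with hn
        have hsd : s - d = (n : Int) := by omega
        have hmod : PySem.Int.mod (s - d) 114 = ((n % 114 : Nat) : Int) := by
          rw [hsd]; exact_mod_cast PySem.Int.mod_natCast n 114
        rw [hmod, loopB_eq 7 (n % 114) _ (nextEvent_tgt p) (by omega),
          ← iterate_mod _ (nextEvent_tgt p) n,
          show s.toNat = n + d.toNat by omega, Function.iterate_add_apply]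
        congr 1
        rw [show d.toNat = ((nextEvent p).1 - p).toNat from rfl]
        exact iterate_event p (by omega)
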